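-- pv_equiv track=rewrite | github.com/k26dr/topcoder | MagicWords.py | count
-- ===== SOURCE A (Python) =====
-- def permutations(n: int):
--     if n < 1:
--         return []
--     elif n == 1:
--         return [[0]]
--     perms = []
--     for p in permutations(n-1):
--         for x in range(len(p) + 1):
--             perm=list(p)
--             perm.insert(x, n-1)
--             perms.append(perm)
--     return perms
--
-- def shift(word:str, i:int):
--     return word[i:] + word[:i]
--
-- def shiftK(word: str):
--     counter=0
--     for i in range(len(word)):
--         if shift(word, i) == word:
--             counter+=1
--     return counter
--
-- def count (S: list, K: int):
--     if len(''.join(S)) % K != 0: # if the length of the string isn't divisible by a K, it can't have magic words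
--         return 0
--
--     counter = 0
--     for perm in permutations(len(S)): # perm is a list
--         word = ''.join(S[n] for n in perm) # make word from perm
--         if shiftK(word) == K:
--             counter += 1
--     return counter
-- ===== SOURCE B (Python) =====
-- def _rotations(w):
--     # number of cyclic rotations fixing w = len(w) // (smallest rotation period);
--     # the smallest fixing rotation divides len(w), so only divisors are tested
--     L = len(w)
--     for i in range(1, L + 1):
--         if L % i == 0 and w[i:] + w[:i] == w:
--             return L // i
--     return 0  # empty word: no rotations
--
--
-- def count(S, K):
--     if len(''.join(S)) % K != 0:
--         return 0
--     perms = [[]]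
--     for s in S:
--         perms = [p[:i] + [s] + p[i:] for p in perms for i in range(len(p) + 1)]
--     total = 0
--     for p in perms:
--         if _rotations(''.join(p)) == K:
--             total += 1
--     return total
-- ===== Notes on version B (the rewrite author's own statement) =====
-- stated objective: alternative
-- what changed: B computes the number of invariant rotations as L // d where d is the smallest divisor of L whose rotation fixes the word (early exit at the first witness) instead of A's testing all L rotations, and builds the permuted words by one fold of slice-insertions over the strings instead of A's recursion over index permutations.
-- outside the precondition, e.g. on count(['ab'], 0): A raises ZeroDivisionError, B raises ZeroDivisionError
import Mathlib
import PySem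

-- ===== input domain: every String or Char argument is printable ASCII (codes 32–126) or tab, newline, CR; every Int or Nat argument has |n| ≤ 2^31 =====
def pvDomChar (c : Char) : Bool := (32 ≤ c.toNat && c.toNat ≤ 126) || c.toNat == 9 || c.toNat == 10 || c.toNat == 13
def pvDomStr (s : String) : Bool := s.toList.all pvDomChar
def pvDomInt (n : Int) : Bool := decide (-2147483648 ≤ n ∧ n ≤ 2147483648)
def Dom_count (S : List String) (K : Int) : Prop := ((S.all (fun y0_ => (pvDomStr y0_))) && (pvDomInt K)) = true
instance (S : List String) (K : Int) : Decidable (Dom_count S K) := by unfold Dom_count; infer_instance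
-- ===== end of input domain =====

-- B counts invariant rotations as L // d, d the smallest fixing rotation (a divisor of L),
-- instead of A's testing of all L rotations, and builds the permuted words by one fold of
-- slice-insertions over the strings instead of A's recursion over index permutations (alternative).

-- ===== PORT A =====
def pyPermutations (n : Int) : List (List Int) :=
  if n < 1 then []
  else if n = 1 then [[0]]
  else
    (pyPermutations (n - 1)).foldl
      (fun perms p =>
        (PySem.List.pyRange 0 ((p.length : Int) + 1)).foldl
          (fun perms x => perms ++ [PySem.List.insert p x (n - 1)]) perms)
      []
termination_by n.toNat
decreasing_by omega

def pyShift (word : String) (i : Int) : String :=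
  PySem.Str.slice word (some i) none ++ PySem.Str.slice word none (some i)

def pyShiftK (word : String) : Int :=
  (PySem.List.pyRange 0 (PySem.Str.len word)).foldl
    (fun counter i => if pyShift word i == word then counter + 1 else counter) 0

def count (S : List String) (K : Int) : Int :=
  if PySem.Int.mod (PySem.Str.len (PySem.Str.join "" S)) K ≠ 0 then 0
  else
    (pyPermutations (S.length : Int)).foldl
      (fun counter perm =>
        -- ''.join(S[n] for n in perm); the .getD "" only totalises S[n] (n always in range)
        if pyShiftK (PySem.Str.join "" (perm.map (fun n => (PySem.List.pyGet? S n).getD ""))) = K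
        then counter + 1 else counter) 0

-- ===== PORT B =====
def rotationsAlt (w : String) : Int :=
  let L : Int := PySem.Str.len w
  match (PySem.List.pyRange 1 (L + 1)).find?
      (fun i => PySem.Int.mod L i == 0 &&
        (PySem.Str.slice w (some i) none ++ PySem.Str.slice w none (some i)) == w) with
  | some i => PySem.Int.floordiv L i
  | none => 0

def count_alt (S : List String) (K : Int) : Int :=
  if PySem.Int.mod (PySem.Str.len (PySem.Str.join "" S)) K ≠ 0 then 0
  else
    let perms := S.foldl
      (fun perms s =>
        perms.flatMap (fun p =>
          (PySem.List.pyRange 0 ((p.length : Int) + 1)).map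
            (fun i => PySem.List.slice p none (some i) ++ [s] ++ PySem.List.slice p (some i) none)))
      [[]]
    perms.foldl (fun total p =>
      if rotationsAlt (PySem.Str.join "" p) = K then total + 1 else total) 0

-- ===== PRECONDITION & SPEC =====
-- Pre_ excludes exactly K = 0, on which A raises ZeroDivisionError at `len(...) % K`.
def Pre_count (S : List String) (K : Int) : Prop := K ≠ 0
instance (S : List String) (K : Int) : Decidable (Pre_count S K) := by unfold Pre_count; infer_instance
def pvWitness_count : List String × Int := (["ab", "c"], 1)

def Spec_count (S : List String) (K : Int) (out : Int) : Prop := out = count_alt S K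
instance (S : List String) (K : Int) (out : Int) : Decidable (Spec_count S K out) := by unfold Spec_count; infer_instance

-- ===== CLAIM (what is proved, stated in full; the proofs are below) =====
def Claim_equal_count : Prop := ∀ (S : List String) (K : Int), Dom_count S K → Pre_count S K → Spec_count S K (count S K)

-- ===== LEMMAS AND PROOFS =====

theorem rotFix_add {α : Type} (c : List α) {i j : ℕ} (hi : c.rotate i = c) (hj : c.rotate j = c) :
    c.rotate (i + j) = c := by
  rw [← List.rotate_rotate, hi, hj]

theorem rotFix_mul {α : Type} (c : List α) (d k : ℕ) (hd : c.rotate d = c) :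
    c.rotate (k * d) = c := by
  induction k with
  | zero => simp
  | succ k ih => rw [Nat.succ_mul]; exact rotFix_add c ih hd

theorem rotFix_dvd {α : Type} (c : List α) (d : ℕ) (hd0 : 0 < d) (hdL : d ≤ c.length)
    (hfix : c.rotate d = c) (hmin : ∀ j, 0 < j → j < d → c.rotate j ≠ c) :
    ∀ j, c.rotate j = c → d ∣ j := by
  intro j
  induction j using Nat.strong_induction_on with
  | _ j ih =>
    intro hj
    rcases Nat.lt_or_ge j d with h | h
    · rcases Nat.eq_zero_or_pos j with rfl | hj0
      · exact dvd_zero d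
      · exact absurd hj (hmin j hj0 h)
    · have hLd : c.rotate (c.length - d) = c := by
        have h2 : (c.rotate d).rotate (c.length - d) = c := by
          rw [List.rotate_rotate, Nat.add_sub_cancel' hdL, List.rotate_length]
        rwa [hfix] at h2
      have h3 : c.rotate (j - d) = c := by
        have h2 : c.rotate (j + (c.length - d)) = c := rotFix_add c hj hLd
        have he : j + (c.length - d) = c.length + (j - d) := by omega
        rw [he, ← List.rotate_rotate, List.rotate_length] at h2
        exact h2
      have h4 := ih (j - d) (by omega) h3
      have h5 : d ∣ (j - d) + d := Nat.dvd_add h4 dvd_rfl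
      rwa [Nat.sub_add_cancel h] at h5

theorem countP_dvd_range (d q : ℕ) (hd0 : 0 < d) :
    (List.range (q * d)).countP (fun j => decide (d ∣ j)) = q := by
  induction q with
  | zero => simp
  | succ q ih =>
    have he : (q + 1) * d = q * d + d := by ring
    rw [he, List.range_add, List.countP_append, ih, List.countP_map]
    have h1 : ∀ x ∈ List.range d,
        ((fun j => decide (d ∣ j)) ∘ (fun x => q * d + x)) x = decide (x = 0) := by
      intro x hx
      have hxd : x < d := List.mem_range.mp hx
      simp only [Function.comp]
      by_cases h0 : x = 0
      · subst h0; simp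
      · have hnd : ¬ d ∣ q * d + x := by
          intro hdvd
          have hdx : d ∣ x := (Nat.dvd_add_right ⟨q, by ring⟩).mp hdvd
          exact h0 (Nat.eq_zero_of_dvd_of_lt hdx hxd)
        simp [hnd, h0]
    have h2 : ∀ x ∈ List.range d,
        (((fun j => decide (d ∣ j)) ∘ (fun x => q * d + x)) x = true ↔ decide (x = 0) = true) := by
      intro x hx; rw [h1 x hx]
    rw [List.countP_congr h2]
    obtain ⟨d', rfl⟩ : ∃ d', d = d' + 1 := ⟨d - 1, by omega⟩
    rw [List.range_succ_eq_map]
    simp [List.countP_map, Function.comp]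

-- join with empty separator is flatten
theorem shift_toList (w : String) (j : ℕ) (h : j ≤ w.toList.length) :
    (pyShift w (j : Int)).toList = w.toList.rotate j := by
  rw [pyShift, String.toList_append, PySem.Str.toList_slice, PySem.Str.toList_slice,
    PySem.Chars.slice_eq_listSlice, PySem.Chars.slice_eq_listSlice,
    PySem.List.slice_from_natCast, PySem.List.slice_to_natCast,
    List.rotate_eq_drop_append_take h]

theorem shift_beq (w : String) (j : ℕ) (h : j ≤ w.toList.length) :
    (pyShift w (j : Int) == w) = decide (w.toList.rotate j = w.toList) := by
  by_cases he : w.toList.rotate j = w.toList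
  · have : pyShift w (j : Int) = w := String.toList_inj.mp (by rw [shift_toList w j h, he])
    simp [this, he]
  · have : pyShift w (j : Int) ≠ w := by
      intro hc; exact he (by rw [← shift_toList w j h, hc])
    simp [this, he]

theorem str_len_eq (w : String) : PySem.Str.len w = (w.toList.length : Int) := by
  simp [PySem.Str.len_eq]

theorem pyShiftK_eq (w : String) :
    pyShiftK w = ((List.range w.toList.length).countP
      (fun j => decide (w.toList.rotate j = w.toList)) : Int) := by
  rw [pyShiftK, str_len_eq, PySem.List.pyRange_zero_natCast, List.foldl_map]
  rw [PySem.List.foldl_congr_mem _ _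
    (fun counter k => if (fun j => decide (w.toList.rotate j = w.toList)) k = true then counter + 1 else counter)
    0 ?_]
  · rw [PySem.List.foldl_count_if]; simp
  · intro acc x hx
    rw [shift_beq w x (Nat.le_of_lt (List.mem_range.mp hx))]

theorem find?_pyRange_first (p : Int → Bool) (x : Int) :
    ∀ (a b : Int), a ≤ x → x < b → p x = true → (∀ y, a ≤ y → y < x → p y = false) →
    (PySem.List.pyRange a b).find? p = some x := by
  have key : ∀ (n : ℕ) (a b : Int), (x - a).toNat = n → a ≤ x → x < b → p x = true →
      (∀ y, a ≤ y → y < x → p y = false) → (PySem.List.pyRange a b).find? p = some x := by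
    intro n
    induction n with
    | zero =>
      intro a b hn hax hxb hx _
      have : a = x := by omega
      subst this
      rw [PySem.List.pyRange_one_cons (lt_of_le_of_lt hax hxb)]
      simp [hx]
    | succ n ih =>
      intro a b hn hax hxb hx hmin
      have hab : a < b := by omega
      rw [PySem.List.pyRange_one_cons hab]
      have hpa : p a = false := hmin a le_rfl (by omega)
      simp [hpa]
      exact ih (a + 1) b (by omega) (by omega) hxb hx (fun y hy => hmin y (by omega))
  intro a b hax hxb hx hmin
  exact key (x - a).toNat a b rfl hax hxb hx hmin

theorem shift_beq_raw (w : String) (j : ℕ) (h : j ≤ w.toList.length) :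
    ((PySem.Str.slice w (some (j : Int)) none ++ PySem.Str.slice w none (some (j : Int))) == w)
      = decide (w.toList.rotate j = w.toList) := by
  rw [show (PySem.Str.slice w (some (j : Int)) none ++ PySem.Str.slice w none (some (j : Int)))
      = pyShift w (j : Int) from rfl]
  exact shift_beq w j h

theorem countP_dvd_range_of_dvd (d L : ℕ) (hd0 : 0 < d) (hdvd : d ∣ L) :
    (List.range L).countP (fun j => decide (d ∣ j)) = L / d := by
  obtain ⟨q, rfl⟩ := hdvd
  rw [Nat.mul_comm, countP_dvd_range _ _ hd0, Nat.mul_div_cancel _ hd0]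

theorem rotK_eq (w : String) : pyShiftK w = rotationsAlt w := by
  rcases eq_or_ne w.toList [] with hnil | hne
  · rw [pyShiftK_eq, rotationsAlt]
    rw [str_len_eq, hnil]
    simp
  · have hL : 0 < w.toList.length := List.length_pos_iff.mpr hne
    set c := w.toList with hc
    have hex : ∃ j, 0 < j ∧ c.rotate j = c := ⟨c.length, hL, List.rotate_length c⟩
    obtain ⟨hd0, hfix⟩ := Nat.find_spec hex
    set d := Nat.find hex with hd
    have hdL : d ≤ c.length := Nat.find_le ⟨hL, List.rotate_length c⟩
    have hmin : ∀ j, 0 < j → j < d → c.rotate j ≠ c := fun j hj hlt hcc =>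
      Nat.find_min hex hlt ⟨hj, hcc⟩
    have hdvdL : d ∣ c.length := rotFix_dvd c d hd0 hdL hfix hmin c.length (List.rotate_length c)
    have hiff : ∀ j, c.rotate j = c ↔ d ∣ j := by
      intro j
      constructor
      · exact rotFix_dvd c d hd0 hdL hfix hmin j
      · rintro ⟨k, rfl⟩; rw [Nat.mul_comm]; exact rotFix_mul c d k hfix
    have hA : pyShiftK w = ((c.length / d : ℕ) : Int) := by
      rw [pyShiftK_eq]
      have hcong : ∀ j ∈ List.range c.length,
          ((fun j => decide (c.rotate j = c)) j = true ↔ (fun j => decide (d ∣ j)) j = true) := by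
        intro j _; simp [hiff j]
      rw [← hc, List.countP_congr hcong, countP_dvd_range_of_dvd d c.length hd0 hdvdL]
    have hB : rotationsAlt w = ((c.length / d : ℕ) : Int) := by
      rw [rotationsAlt]
      have hlen : PySem.Str.len w = (c.length : Int) := by rw [str_len_eq]
      rw [hlen]
      have hfind : (PySem.List.pyRange 1 ((c.length : Int) + 1)).find?
          (fun i => PySem.Int.mod (c.length : Int) i == 0 &&
            (PySem.Str.slice w (some i) none ++ PySem.Str.slice w none (some i)) == w)
          = some (d : Int) := by
        apply find?_pyRange_first _ (d : Int) 1 ((c.length : Int) + 1)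
          (by exact_mod_cast hd0) (by exact_mod_cast Nat.lt_succ_of_le hdL)
        · have h1 : PySem.Int.mod (c.length : Int) (d : Int) = 0 := by
            rw [PySem.Int.mod_natCast, Nat.dvd_iff_mod_eq_zero.mp hdvdL]
            rfl
          have h2 := shift_beq_raw w d hdL
          rw [← hc] at h2
          simp only [h1, h2]
          simp [hfix]
        · intro y h1y hyd
          have hy0 : 0 < y.toNat := by omega
          have hyd' : y.toNat < d := by omega
          have hyL : y.toNat ≤ c.length := by omega
          have hy : y = (y.toNat : Int) := by omega
          rw [hy]
          have h2 := shift_beq_raw w y.toNat hyL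
          rw [← hc] at h2
          simp only [h2]
          simp [hmin y.toNat hy0 hyd']
      rw [hfind]
      show PySem.Int.floordiv (c.length : Int) (d : Int) = _
      rw [PySem.Int.floordiv_natCast]
    rw [hA, hB]

theorem pyPermutations_succ (n : ℕ) (hn : 1 ≤ n) :
    pyPermutations ((n : Int) + 1) = (pyPermutations (n : Int)).flatMap
      (fun p => (List.range (p.length + 1)).map
        (fun x => p.take x ++ ((n : Int)) :: p.drop x)) := by
  rw [pyPermutations]
  rw [if_neg (by omega), if_neg (by exact_mod_cast by omega)]
  have hstep : ∀ (acc : List (List Int)) (p : List Int),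
      (PySem.List.pyRange 0 ((p.length : Int) + 1)).foldl
        (fun perms x => perms ++ [PySem.List.insert p x ((n : Int) + 1 - 1)]) acc
      = acc ++ (List.range (p.length + 1)).map (fun x => p.take x ++ ((n : Int)) :: p.drop x) := by
    intro acc p
    rw [PySem.List.foldl_append_singleton_eq_map]
    congr 1
    have : ((p.length : Int) + 1) = ((p.length + 1 : ℕ) : Int) := by push_cast; ring
    rw [this, PySem.List.pyRange_zero_natCast, List.map_map]
    apply List.map_congr_left
    intro k hk
    have hkle : k ≤ p.length := by have := List.mem_range.mp hk; omega
    simp only [Function.comp]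
    rw [show ((n : Int) + 1 - 1) = (n : Int) by ring, PySem.List.insert_natCast p k _ hkle]
  have : (fun (perms : List (List Int)) (p : List Int) =>
      (PySem.List.pyRange 0 ((p.length : Int) + 1)).foldl
        (fun perms x => perms ++ [PySem.List.insert p x ((n : Int) + 1 - 1)]) perms)
      = (fun perms p => perms ++ (List.range (p.length + 1)).map
          (fun x => p.take x ++ ((n : Int)) :: p.drop x)) := by
    funext acc p; exact hstep acc p
  rw [this, PySem.List.foldl_append_eq_flatMap]
  simp

theorem pyPermutations_one : pyPermutations 1 = [[0]] := by
  rw [pyPermutations]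
  norm_num

theorem pyPermutations_mem_bound :
    ∀ (n : ℕ), 1 ≤ n → ∀ p ∈ pyPermutations (n : Int), ∀ x ∈ p, 0 ≤ x ∧ x < (n : Int) := by
  intro n
  induction n with
  | zero => omega
  | succ n ih =>
    intro _ p hp x hx
    rcases Nat.eq_zero_or_pos n with rfl | hn
    · rw [show ((0 : ℕ) + 1 : ℕ) = (1 : ℕ) from rfl] at hp
      rw [Nat.cast_one, pyPermutations_one] at hp
      simp at hp
      subst hp
      simp at hx
      subst hx
      norm_num
    · rw [Nat.cast_add, Nat.cast_one, pyPermutations_succ n hn] at hp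
      rw [List.mem_flatMap] at hp
      obtain ⟨q, hq, hpq⟩ := hp
      rw [List.mem_map] at hpq
      obtain ⟨k, _, rfl⟩ := hpq
      rw [List.mem_append] at hx
      rcases hx with hx | hx
      · have hxq : x ∈ q := List.mem_of_mem_take hx
        have hb := ih hn q hq x hxq
        exact ⟨hb.1, by push_cast; omega⟩
      · rw [List.mem_cons] at hx
        rcases hx with rfl | hx
        · exact ⟨by positivity, by push_cast; omega⟩
        · have hxq : x ∈ q := List.mem_of_mem_drop hx
          have hb := ih hn q hq x hxq
          exact ⟨hb.1, by push_cast; omega⟩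

def strsOf (S : List String) (p : List Int) : List String :=
  p.map (fun n => (PySem.List.pyGet? S n).getD "")

def insAllS (s : String) (p : List String) : List (List String) :=
  (List.range (p.length + 1)).map (fun i => p.take i ++ s :: p.drop i)

def wperms (S : List String) : List (List String) :=
  S.foldl (fun ps s => ps.flatMap (insAllS s)) [[]]

-- B's slice-insertion fold computes wperms
theorem bperms_eq (S : List String) :
    S.foldl (fun perms s => perms.flatMap (fun p =>
        (PySem.List.pyRange 0 ((p.length : Int) + 1)).map
          (fun i => PySem.List.slice p none (some i) ++ [s] ++ PySem.List.slice p (some i) none)))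
      [[]] = wperms S := by
  rw [wperms]
  congr 1
  funext perms s
  congr 1
  funext p
  rw [insAllS]
  rw [show ((p.length : Int) + 1) = ((p.length + 1 : ℕ) : Int) by push_cast; ring,
    PySem.List.pyRange_zero_natCast, List.map_map]
  apply List.map_congr_left
  intro k _
  simp only [Function.comp]
  rw [PySem.List.slice_to_natCast, PySem.List.slice_from_natCast]
  simp

theorem words_eq (S : List String) (hS : S ≠ []) :
    (pyPermutations (S.length : Int)).map (strsOf S) = wperms S := by
  induction S using List.reverseRecOn with
  | nil => exact absurd rfl hS
  | append_singleton T s ih =>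
    rcases eq_or_ne T [] with rfl | hT
    · simp only [List.nil_append, List.length_cons, List.length_nil]
      rw [Nat.cast_one, pyPermutations_one]
      rw [wperms]
      simp only [List.foldl_cons, List.foldl_nil, List.flatMap]
      rw [show List.map (strsOf [s]) [[0]] = [[s]] by
        simp [strsOf, PySem.List.pyGet?, PySem.List.pyIdx?]]
      simp [insAllS]
    · have hTlen : 1 ≤ T.length := by
        cases T with | nil => exact absurd rfl hT | cons a l => simp
      rw [List.length_append, List.length_cons, List.length_nil]
      rw [show ((T.length + (0 + 1) : ℕ) : Int) = ((T.length : ℕ) : Int) + 1 by push_cast; ring]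
      rw [pyPermutations_succ T.length hTlen]
      rw [List.map_flatMap]
      have hstep : ∀ q ∈ pyPermutations (T.length : Int),
          (List.map (strsOf (T ++ [s]))
            ((List.range (q.length + 1)).map (fun x => q.take x ++ ((T.length : Int)) :: q.drop x)))
          = insAllS s (strsOf T q) := by
        intro q hq
        rw [List.map_map, insAllS]
        have hlen : (strsOf T q).length = q.length := by rw [strsOf, List.length_map]
        rw [hlen]
        apply List.map_congr_left
        intro k _
        simp only [Function.comp]
        rw [strsOf, List.map_append, List.map_cons, List.map_take, List.map_drop]
        have hmid : (PySem.List.pyGet? (T ++ [s]) ((T.length : Int))).getD "" = s := by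
          rw [PySem.List.pyGet?_ofNat (T ++ [s]) T.length (by simp)]
          simp
        rw [hmid]
        have hrest : q.map (fun n => (PySem.List.pyGet? (T ++ [s]) n).getD "")
            = q.map (fun n => (PySem.List.pyGet? T n).getD "") := by
          apply List.map_congr_left
          intro x hx
          obtain ⟨hx0, hxlt⟩ := pyPermutations_mem_bound T.length hTlen q hq x hx
          have hxk : x = ((x.toNat : ℕ) : Int) := by omega
          have hklt : x.toNat < T.length := by omega
          rw [hxk, PySem.List.pyGet?_ofNat T x.toNat hklt,
            PySem.List.pyGet?_ofNat (T ++ [s]) x.toNat (by simp; omega)]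
          simp only [Option.getD_some]
          rw [List.getElem_append_left hklt]
        rw [hrest]
        rfl
      rw [List.flatMap_congr hstep]
      have hfm : (pyPermutations (T.length : Int)).flatMap (fun q => insAllS s (strsOf T q))
          = ((pyPermutations (T.length : Int)).map (strsOf T)).flatMap (insAllS s) := by
        rw [List.flatMap_map]
      rw [hfm, ih hT]
      conv_rhs => rw [wperms]
      rw [List.foldl_append, List.foldl_cons, List.foldl_nil, ← wperms]

theorem foldl_count_pred {α : Type} (q : α → Prop) [DecidablePred q] (l : List α) :
    l.foldl (fun acc x => if q x then acc + 1 else acc) (0 : Int)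
      = (l.countP (fun x => decide (q x)) : Int) := by
  have h := PySem.List.foldl_count_if (fun x => decide (q x)) l 0
  simpa using h

theorem main_equal (S : List String) (K : Int) (hK : K ≠ 0) : count S K = count_alt S K := by
  rw [count, count_alt]
  by_cases hmod : PySem.Int.mod (PySem.Str.len (PySem.Str.join "" S)) K ≠ 0
  · rw [if_pos hmod, if_pos hmod]
  · rw [if_neg hmod, if_neg hmod]
    rcases eq_or_ne S [] with rfl | hS
    · rw [show ((List.length ([] : List String) : ℕ) : Int) = 0 from rfl]
      rw [show pyPermutations 0 = [] by rw [pyPermutations]; norm_num]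
      simp only [List.foldl_nil, List.foldl_cons]
      have h0 : rotationsAlt (PySem.Str.join "" []) = 0 := by decide
      simp [h0, Ne.symm hK]
    · rw [bperms_eq S, ← words_eq S hS]
      simp only [foldl_count_pred]
      rw [List.countP_map]
      congr 1
      apply List.countP_congr
      intro p _
      simp only [Function.comp, strsOf, rotK_eq]
      rfl

-- ===== VERDICT (by name: the statement is the Claim_ definition above) =====
theorem count_spec : Claim_equal_count := by
  intro S K _ hK
  unfold Spec_count
  exact main_equal S K hK
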